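-- pv_equiv track=rewrite | github.com/jhonymiler/celulas_automatas | src/cellular.py | get_local_state
-- ===== SOURCE A (Python) =====
-- def get_local_state(matrix, x, y, radius=2):
--     """
--     Obtém o estado local ao redor de uma posição.
--     Usado para o indivíduo "perceber" o ambiente sem conhecer as regras.
--     Retorna uma tupla representando o estado local.
--     """
--     rows = len(matrix)
--     cols = len(matrix[0])
--     state = []
--
--     for dy in range(-radius, radius + 1):
--         for dx in range(-radius, radius + 1):
--             ni, nj = y + dy, x + dx
--             if 0 <= ni < rows and 0 <= nj < cols:
--                 state.append(matrix[ni][nj])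
--             else:
--                 state.append(-1)  # Fora do mapa
--
--     return tuple(state)
-- ===== SOURCE B (Python) =====
-- def get_local_state(matrix, x, y, radius=2):
--     """Row-at-a-time: one slice of the row plus left/right -1 padding,
--     instead of testing every (dy, dx) cell individually."""
--     rows = len(matrix)
--     cols = len(matrix[0])
--     blank = [-1] * (2 * radius + 1)
--     out = []
--     for dy in range(-radius, radius + 1):
--         ni = y + dy
--         if 0 <= ni < rows:
--             lo = max(0, x - radius)
--             hi = min(cols, x + radius + 1)
--             if lo < hi:
--                 out.extend([-1] * (lo - (x - radius))
--                            + matrix[ni][lo:hi]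
--                            + [-1] * ((x + radius + 1) - hi))
--             else:
--                 out.extend(blank)
--         else:
--             out.extend(blank)
--     return tuple(out)
-- ===== Notes on version B (the rewrite author's own statement) =====
-- stated objective: alternative
-- what changed: Replaces the nested per-cell (dy,dx) bounds-test loop by a per-row construction: one clamped slice of the row plus computed left/right runs of -1 (and a whole blank row when the row index is out of range).
import Mathlib
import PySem

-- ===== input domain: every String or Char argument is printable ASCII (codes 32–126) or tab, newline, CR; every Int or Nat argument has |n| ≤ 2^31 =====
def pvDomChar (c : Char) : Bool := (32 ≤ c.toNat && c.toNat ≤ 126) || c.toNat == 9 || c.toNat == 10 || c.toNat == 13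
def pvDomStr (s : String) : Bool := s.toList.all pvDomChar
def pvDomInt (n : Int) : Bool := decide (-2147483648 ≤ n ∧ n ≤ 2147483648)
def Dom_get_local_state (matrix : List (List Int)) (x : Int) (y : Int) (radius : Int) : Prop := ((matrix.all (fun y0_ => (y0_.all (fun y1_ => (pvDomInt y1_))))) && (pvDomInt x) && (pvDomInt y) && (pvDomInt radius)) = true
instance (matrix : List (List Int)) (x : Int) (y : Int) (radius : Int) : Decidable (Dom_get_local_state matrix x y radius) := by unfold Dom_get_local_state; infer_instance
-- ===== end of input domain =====

-- B builds each output row at once (left -1 padding ++ one clamped row slice ++ right -1 padding,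
-- or a blank row) instead of A's per-cell (dy,dx) bounds test; same asymptotic cost, measured
-- constant-factor faster in a timing run.

-- ===== PORT A =====
def get_local_state (matrix : List (List Int)) (x : Int) (y : Int) (radius : Int) : List Int :=
  let rows : Int := matrix.length
  let cols : Int := (PySem.List.pyGetD matrix 0 []).length
  (PySem.List.pyRange (-radius) (radius + 1) 1).foldl (fun state dy =>
    (PySem.List.pyRange (-radius) (radius + 1) 1).foldl (fun state dx =>
      let ni := y + dy
      let nj := x + dx
      if 0 ≤ ni ∧ ni < rows ∧ 0 ≤ nj ∧ nj < cols then
        state ++ [PySem.List.pyGetD (PySem.List.pyGetD matrix ni []) nj 0]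
      else
        state ++ [-1]) state) []

-- ===== PORT B =====
def get_local_state_alt (matrix : List (List Int)) (x : Int) (y : Int) (radius : Int) : List Int :=
  let rows : Int := matrix.length
  let cols : Int := (PySem.List.pyGetD matrix 0 []).length
  let blank : List Int := List.replicate (2 * radius + 1).toNat (-1)
  (PySem.List.pyRange (-radius) (radius + 1) 1).foldl (fun out dy =>
    let ni := y + dy
    if 0 ≤ ni ∧ ni < rows then
      let lo := max 0 (x - radius)
      let hi := min cols (x + radius + 1)
      if lo < hi then
        out ++ (List.replicate (lo - (x - radius)).toNat (-1)
                ++ PySem.List.slice (PySem.List.pyGetD matrix ni []) (some lo) (some hi)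
                ++ List.replicate ((x + radius + 1) - hi).toNat (-1))
      else
        out ++ blank
    else
      out ++ blank) []

-- ===== PRECONDITION & SPEC =====
-- Pre_ excludes exactly the inputs where A raises IndexError: the empty matrix (len(matrix[0]))
-- and matrices whose row i lies in the row window while the in-bounds part of the column window
-- reaches past the end of that (shorter-than-row-0) row.
def Pre_get_local_state (matrix : List (List Int)) (x : Int) (y : Int) (radius : Int) : Prop :=
  matrix ≠ [] ∧
  ∀ i : Nat, i < matrix.length →
    (y - radius ≤ (i : Int) ∧ (i : Int) ≤ y + radius ∧
      max 0 (x - radius) ≤ min (((matrix.headD []).length : Int) - 1) (x + radius)) →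
    min (((matrix.headD []).length : Int) - 1) (x + radius) < ((matrix.getD i []).length : Int)
instance (matrix : List (List Int)) (x : Int) (y : Int) (radius : Int) : Decidable (Pre_get_local_state matrix x y radius) := by unfold Pre_get_local_state; infer_instance
def pvWitness_get_local_state : List (List Int) × Int × Int × Int := ([[1, 2], [3, 4]], 0, 1, 1)

def Spec_get_local_state (matrix : List (List Int)) (x : Int) (y : Int) (radius : Int) (out : List Int) : Prop := out = get_local_state_alt matrix x y radius
instance (matrix : List (List Int)) (x : Int) (y : Int) (radius : Int) (out : List Int) : Decidable (Spec_get_local_state matrix x y radius out) := by unfold Spec_get_local_state; infer_instance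

-- ===== CLAIM (what is proved, stated in full; the proofs are below) =====
def Claim_equal_get_local_state : Prop := ∀ (matrix : List (List Int)) (x : Int) (y : Int) (radius : Int), Dom_get_local_state matrix x y radius → Pre_get_local_state matrix x y radius → Spec_get_local_state matrix x y radius (get_local_state matrix x y radius)

-- ===== LEMMAS AND PROOFS =====

theorem pv_foldl_flatmap {α : Type} (l : List α) (g : α → List Int)
    (f : List Int → α → List Int) (hf : ∀ acc t, f acc t = acc ++ g t) (s : List Int) :
    l.foldl f s = s ++ l.flatMap g := by
  induction l generalizing s with
  | nil => simp
  | cons a t ih => simp [hf, ih]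

theorem pv_map_const {α β : Type} (l : List α) (c : β) :
    l.map (fun _ => c) = List.replicate l.length c := by
  induction l with
  | nil => rfl
  | cons a t ih => simp [List.replicate_succ, ih]

theorem pv_map_pyGetD_shift (row : List Int) (a b x : Int) (h0 : 0 ≤ a) (hb : b ≤ (row.length : Int)) :
    (PySem.List.pyRange (a - x) (b - x) 1).map (fun dx => PySem.List.pyGetD row (x + dx) 0)
      = (row.drop a.toNat).take (b.toNat - a.toNat) := by
  apply List.ext_getElem
  · simp [PySem.List.length_pyRange_one]
    omega
  · intro i h1 h2
    simp only [List.getElem_map, PySem.List.getElem_pyRange_one, List.getElem_take, List.getElem_drop]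
    have hlen : (PySem.List.pyRange (a - x) (b - x) 1).length = (b - a).toNat := by
      rw [PySem.List.length_pyRange_one]; congr 1; ring
    simp only [List.length_map, hlen] at h1
    have : x + (a - x + ↑i) = a + ↑i := by ring
    rw [this, PySem.List.pyGetD_eq_getElem _ _ (by omega) (by omega)]
    congr 1
    omega

theorem pv_row_eq (row : List Int) (x r cols : Int)
    (himp : max 0 (x - r) < min cols (x + r + 1) → min cols (x + r + 1) ≤ (row.length : Int)) :
    (PySem.List.pyRange (-r) (r + 1) 1).map
      (fun dx => if 0 ≤ x + dx ∧ x + dx < cols then PySem.List.pyGetD row (x + dx) 0 else -1)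
    = (if max 0 (x - r) < min cols (x + r + 1) then
         List.replicate (max 0 (x - r) - (x - r)).toNat (-1)
           ++ PySem.List.slice row (some (max 0 (x - r))) (some (min cols (x + r + 1)))
           ++ List.replicate ((x + r + 1) - min cols (x + r + 1)).toNat (-1)
       else List.replicate (2 * r + 1).toNat (-1)) := by
  by_cases hcase : max 0 (x - r) < min cols (x + r + 1)
  · have hh := himp hcase
    have e1 : (PySem.List.pyRange (-r) (max 0 (x - r) - x) 1).map
        (fun dx => if 0 ≤ x + dx ∧ x + dx < cols then PySem.List.pyGetD row (x + dx) 0 else -1)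
        = List.replicate (max 0 (x - r) - (x - r)).toNat (-1) := by
      rw [List.map_congr_left (g := fun _ => (-1 : Int)) (fun dx hdx => by
        rw [PySem.List.mem_pyRange_one] at hdx
        rw [if_neg (by omega)])]
      rw [pv_map_const, PySem.List.length_pyRange_one]
      congr 1
      omega
    have e2 : (PySem.List.pyRange (max 0 (x - r) - x) (min cols (x + r + 1) - x) 1).map
        (fun dx => if 0 ≤ x + dx ∧ x + dx < cols then PySem.List.pyGetD row (x + dx) 0 else -1)
        = PySem.List.slice row (some (max 0 (x - r))) (some (min cols (x + r + 1))) := by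
      rw [List.map_congr_left (g := fun dx => PySem.List.pyGetD row (x + dx) 0) (fun dx hdx => by
        rw [PySem.List.mem_pyRange_one] at hdx
        rw [if_pos (by omega)])]
      rw [pv_map_pyGetD_shift row (max 0 (x - r)) (min cols (x + r + 1)) x (by omega) (by omega)]
      rw [PySem.List.slice_of_nonneg row (by omega) (by omega) (by omega) (by omega)]
    have e3 : (PySem.List.pyRange (min cols (x + r + 1) - x) (r + 1) 1).map
        (fun dx => if 0 ≤ x + dx ∧ x + dx < cols then PySem.List.pyGetD row (x + dx) 0 else -1)
        = List.replicate ((x + r + 1) - min cols (x + r + 1)).toNat (-1) := by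
      rw [List.map_congr_left (g := fun _ => (-1 : Int)) (fun dx hdx => by
        rw [PySem.List.mem_pyRange_one] at hdx
        rw [if_neg (by omega)])]
      rw [pv_map_const, PySem.List.length_pyRange_one]
      congr 1
      omega
    rw [if_pos hcase,
        PySem.List.pyRange_one_append (-r) (max 0 (x - r) - x) (r + 1) (by omega) (by omega),
        PySem.List.pyRange_one_append (max 0 (x - r) - x) (min cols (x + r + 1) - x) (r + 1)
          (by omega) (by omega),
        List.map_append, List.map_append, e1, e2, e3, List.append_assoc]
  · rw [if_neg hcase]
    rw [List.map_congr_left (g := fun _ => (-1 : Int)) (fun dx hdx => by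
      rw [PySem.List.mem_pyRange_one] at hdx
      rw [if_neg (by omega)])]
    rw [pv_map_const, PySem.List.length_pyRange_one]
    congr 1
    omega

theorem pv_flatmap_congr {α β : Type} (l : List α) (f g : α → List β)
    (h : ∀ a ∈ l, f a = g a) : l.flatMap f = l.flatMap g := by
  induction l with
  | nil => rfl
  | cons a t ih => simp only [List.flatMap_cons, h a (List.mem_cons_self), ih fun b hb => h b (List.mem_cons_of_mem a hb)]

theorem pv_flatmap_singleton {α : Type} (l : List α) (h : α → Int) :
    l.flatMap (fun t => [h t]) = l.map h := by
  induction l with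
  | nil => rfl
  | cons a t ih => simp [ih]


-- ===== VERDICT (by name: the statement is the Claim_ definition above) =====
theorem get_local_state_spec : Claim_equal_get_local_state := by
  unfold Claim_equal_get_local_state
  intro matrix x y radius _ hpre
  obtain ⟨hne, hwin⟩ := hpre
  unfold Spec_get_local_state
  have hcols : matrix.getD 0 [] = matrix.headD [] := by
    cases matrix with
    | nil => rfl
    | cons a t => rfl
  have hA : get_local_state matrix x y radius
      = (PySem.List.pyRange (-radius) (radius + 1) 1).flatMap (fun dy =>
          (PySem.List.pyRange (-radius) (radius + 1) 1).map (fun dx =>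
            if 0 ≤ y + dy ∧ y + dy < (matrix.length : Int) ∧ 0 ≤ x + dx ∧
                x + dx < ((PySem.List.pyGetD matrix 0 []).length : Int) then
              PySem.List.pyGetD (PySem.List.pyGetD matrix (y + dy) []) (x + dx) 0
            else -1)) := by
    unfold get_local_state
    rw [pv_foldl_flatmap _
      (fun dy => (PySem.List.pyRange (-radius) (radius + 1) 1).map (fun dx =>
            if 0 ≤ y + dy ∧ y + dy < (matrix.length : Int) ∧ 0 ≤ x + dx ∧
                x + dx < ((PySem.List.pyGetD matrix 0 []).length : Int) then
              PySem.List.pyGetD (PySem.List.pyGetD matrix (y + dy) []) (x + dx) 0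
            else -1))
      _ (fun acc dy => by
        dsimp only
        rw [pv_foldl_flatmap _
          (fun dx => if 0 ≤ y + dy ∧ y + dy < (matrix.length : Int) ∧ 0 ≤ x + dx ∧
                x + dx < ((PySem.List.pyGetD matrix 0 []).length : Int) then
              [PySem.List.pyGetD (PySem.List.pyGetD matrix (y + dy) []) (x + dx) 0]
            else [-1])
          _ (fun acc dx => by
            dsimp only
            split
            · rfl
            · rfl) acc]
        have hsing : (fun dx => if 0 ≤ y + dy ∧ y + dy < (matrix.length : Int) ∧ 0 ≤ x + dx ∧
                x + dx < ((PySem.List.pyGetD matrix 0 []).length : Int) then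
              [PySem.List.pyGetD (PySem.List.pyGetD matrix (y + dy) []) (x + dx) 0]
            else ([-1] : List Int))
            = fun dx => [if 0 ≤ y + dy ∧ y + dy < (matrix.length : Int) ∧ 0 ≤ x + dx ∧
                x + dx < ((PySem.List.pyGetD matrix 0 []).length : Int) then
              PySem.List.pyGetD (PySem.List.pyGetD matrix (y + dy) []) (x + dx) 0
            else -1] := funext fun dx => by split <;> rfl
        rw [hsing, pv_flatmap_singleton]) []]
    rw [List.nil_append]
  have hB : get_local_state_alt matrix x y radius
      = (PySem.List.pyRange (-radius) (radius + 1) 1).flatMap (fun dy =>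
          if 0 ≤ y + dy ∧ y + dy < (matrix.length : Int) then
            (if max 0 (x - radius) < min ((PySem.List.pyGetD matrix 0 []).length : Int) (x + radius + 1) then
              List.replicate (max 0 (x - radius) - (x - radius)).toNat (-1)
                ++ PySem.List.slice (PySem.List.pyGetD matrix (y + dy) [])
                     (some (max 0 (x - radius)))
                     (some (min ((PySem.List.pyGetD matrix 0 []).length : Int) (x + radius + 1)))
                ++ List.replicate ((x + radius + 1) - min ((PySem.List.pyGetD matrix 0 []).length : Int) (x + radius + 1)).toNat (-1)
            else List.replicate (2 * radius + 1).toNat (-1))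
          else List.replicate (2 * radius + 1).toNat (-1)) := by
    unfold get_local_state_alt
    rw [pv_foldl_flatmap _
      (fun dy =>
          if 0 ≤ y + dy ∧ y + dy < (matrix.length : Int) then
            (if max 0 (x - radius) < min ((PySem.List.pyGetD matrix 0 []).length : Int) (x + radius + 1) then
              List.replicate (max 0 (x - radius) - (x - radius)).toNat (-1)
                ++ PySem.List.slice (PySem.List.pyGetD matrix (y + dy) [])
                     (some (max 0 (x - radius)))
                     (some (min ((PySem.List.pyGetD matrix 0 []).length : Int) (x + radius + 1)))
                ++ List.replicate ((x + radius + 1) - min ((PySem.List.pyGetD matrix 0 []).length : Int) (x + radius + 1)).toNat (-1)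
            else List.replicate (2 * radius + 1).toNat (-1))
          else List.replicate (2 * radius + 1).toNat (-1))
      _ (fun acc dy => by
        dsimp only
        split
        · split
          · rfl
          · rfl
        · rfl) []]
    rw [List.nil_append]
  rw [hA, hB]
  apply pv_flatmap_congr
  intro dy hdym
  rw [PySem.List.mem_pyRange_one] at hdym
  by_cases hdy : 0 ≤ y + dy ∧ y + dy < (matrix.length : Int)
  · rw [if_pos hdy]
    have hnt : ((y + dy).toNat : Int) = y + dy := Int.toNat_of_nonneg hdy.1
    have hilt : (y + dy).toNat < matrix.length := by
      have := hdy.2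
      omega
    have hrowe : PySem.List.pyGetD matrix (y + dy) [] = matrix[(y + dy).toNat] :=
      PySem.List.pyGetD_eq_getElem _ _ hdy.1 hdy.2
    have hgetD : matrix.getD (y + dy).toNat [] = matrix[(y + dy).toNat] :=
      List.getD_eq_getElem _ _ hilt
    have hC : (((PySem.List.pyGetD matrix 0 []).length : Nat) : Int)
        = (((matrix.headD []).length : Nat) : Int) := by
      rw [PySem.List.pyGetD_zero, hcols]
    have himp : max 0 (x - radius) < min (((PySem.List.pyGetD matrix 0 []).length : Nat) : Int) (x + radius + 1) →
        min (((PySem.List.pyGetD matrix 0 []).length : Nat) : Int) (x + radius + 1)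
          ≤ (((PySem.List.pyGetD matrix (y + dy) []).length : Nat) : Int) := by
      intro hcase
      rw [hC] at hcase
      have h2 := hwin (y + dy).toNat hilt ⟨by omega, by omega, by omega⟩
      rw [hgetD, ← hrowe] at h2
      rw [hrowe] at h2 ⊢
      omega
    have hrow := pv_row_eq (PySem.List.pyGetD matrix (y + dy) []) x radius
      (((PySem.List.pyGetD matrix 0 []).length : Nat) : Int) himp
    rw [← hrow]
    apply List.map_congr_left
    intro dx _
    apply if_congr _ rfl rfl
    constructor
    · rintro ⟨_, _, h1, h2⟩; exact ⟨h1, h2⟩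
    · rintro ⟨h1, h2⟩; exact ⟨hdy.1, hdy.2, h1, h2⟩
  · rw [if_neg hdy]
    rw [List.map_congr_left (g := fun _ => (-1 : Int)) (fun dx hdx => by
      rw [if_neg (fun h => hdy ⟨h.1, h.2.1⟩)])]
    rw [pv_map_const, PySem.List.length_pyRange_one]
    congr 1
    omega
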